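-- pv_equiv track=rewrite | github.com/emdb-empiar/noid | noid/pynoid.py | _get_noid_range
-- ===== SOURCE A (Python) =====
-- DIGIT = ['0', '1', '2', '3', '4', '5', '6', '7', '8', '9']  # 10
--
-- XDIGIT = DIGIT + ['a', 'b', 'c', 'd', 'f', 'g', 'h', 'i', 'j', 'k', 'm', 'n', 'o', 'p', 'q', 'r', 's', 't', 'v', 'w',
--                   'x', 'y', 'z'] + \
--          ['A', 'B', 'C', 'D', 'E', 'F', 'G', 'H', 'J', 'K', 'L', 'M', 'N', 'P', 'R', 'S', 'T', 'U', 'V', 'W', 'X', 'Y',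
--           'Z']
--
-- def _get_noid_range(mask):
--     """Given the specified mask compute the maximum number of noids availabl
--
--     :param str mask: the mask; if GENTYPE and CHECKDIG are present they will be ignored; only DIGTYPES are considered
--     :return int max_int: the maximum number of noids
--     """
--     max_int = 1
--     for c in mask:
--         if c == 'e':
--             max_int *= len(XDIGIT)
--         elif c == 'd':
--             max_int *= len(DIGIT)
--     return max_int
-- ===== SOURCE B (Python) =====
-- _FACTOR = {'e': 56, 'd': 10}  # 56 = len(XDIGIT), 10 = len(DIGIT)
--
--
-- def _get_noid_range(mask):
--     """Given the specified mask compute the maximum number of noids available."""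
--     if len(mask) == 0:
--         return 1
--     if len(mask) == 1:
--         return _FACTOR.get(mask, 1)
--     mid = len(mask) // 2
--     return _get_noid_range(mask[:mid]) * _get_noid_range(mask[mid:])
-- ===== Notes on version B (the rewrite author's own statement) =====
-- stated objective: alternative
-- what changed: Replaces the left-to-right running-product loop with a divide-and-conquer recursion that splits the mask in half and multiplies the two halves' ranges, with a per-character factor table at the base case.
import Mathlib
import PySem

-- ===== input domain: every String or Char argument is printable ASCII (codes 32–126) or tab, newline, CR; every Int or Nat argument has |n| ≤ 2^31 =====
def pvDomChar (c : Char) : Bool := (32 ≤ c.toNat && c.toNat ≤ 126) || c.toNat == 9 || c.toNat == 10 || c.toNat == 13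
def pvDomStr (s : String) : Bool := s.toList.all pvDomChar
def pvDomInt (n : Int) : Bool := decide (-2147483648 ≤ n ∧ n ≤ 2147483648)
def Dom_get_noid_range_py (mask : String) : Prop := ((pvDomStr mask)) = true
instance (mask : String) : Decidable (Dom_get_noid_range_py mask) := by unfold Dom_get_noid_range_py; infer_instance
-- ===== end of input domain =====

-- B replaces A's left-to-right running-product loop with a divide-and-conquer recursion
-- (split the mask in half, multiply the halves' ranges; per-character factor table at the base).

-- ===== PORT A =====
def pvDIGIT : List String := ["0","1","2","3","4","5","6","7","8","9"]
def pvXDIGIT : List String :=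
  pvDIGIT ++ ["a","b","c","d","f","g","h","i","j","k","m","n","o","p","q","r","s","t","v","w","x","y","z"]
          ++ ["A","B","C","D","E","F","G","H","J","K","L","M","N","P","R","S","T","U","V","W","X","Y","Z"]

def get_noid_range_py (mask : String) : Int :=
  mask.toList.foldl
    (fun max_int c =>
      if c == 'e' then max_int * (pvXDIGIT.length : Int)
      else if c == 'd' then max_int * (pvDIGIT.length : Int)
      else max_int)
    1

-- ===== PORT B =====
-- _FACTOR.get(c, 1) for the two-entry dict literal {'e': 56, 'd': 10}
def pvFactor : PySem.Dict Char Int :=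
  (PySem.Dict.empty.insert 'e' 56).insert 'd' 10

def pvRangeRec : List Char → Int
  | [] => 1
  | [c] => pvFactor.getD c 1
  | x :: y :: rest =>
      pvRangeRec ((x :: y :: rest).take ((x :: y :: rest).length / 2)) *
      pvRangeRec ((x :: y :: rest).drop ((x :: y :: rest).length / 2))
  termination_by l => l.length
  decreasing_by
  · simp [List.length_take]; omega
  · simp [List.length_drop]; omega

def get_noid_range_py_alt (mask : String) : Int := pvRangeRec mask.toList

-- ===== PRECONDITION & SPEC =====
def Spec_get_noid_range_py (mask : String) (out : Int) : Prop := out = get_noid_range_py_alt mask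
instance (mask : String) (out : Int) : Decidable (Spec_get_noid_range_py mask out) := by unfold Spec_get_noid_range_py; infer_instance

-- ===== CLAIM (what is proved, stated in full; the proofs are below) =====
def Claim_equal_get_noid_range_py : Prop := ∀ (mask : String), Dom_get_noid_range_py mask → Spec_get_noid_range_py mask (get_noid_range_py mask)

-- ===== LEMMAS AND PROOFS =====

theorem pv_prod_fold (l : List Char) (a : Int) :
    l.foldl
      (fun max_int c =>
        if c == 'e' then max_int * (pvXDIGIT.length : Int)
        else if c == 'd' then max_int * (pvDIGIT.length : Int)
        else max_int) a
    = a * 56 ^ l.count 'e' * 10 ^ l.count 'd' := by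
  induction l generalizing a with
  | nil => simp
  | cons x xs ih =>
    simp only [List.foldl_cons, List.count_cons, ih]
    by_cases he : x = 'e'
    · simp [he, pvXDIGIT, pvDIGIT, pow_succ]; ring
    · by_cases hd : x = 'd'
      · simp [hd, pvDIGIT, pow_succ]; ring
      · simp [he, hd]

theorem pv_rangeRec_closed (l : List Char) :
    pvRangeRec l = 56 ^ l.count 'e' * 10 ^ l.count 'd' := by
  induction l using pvRangeRec.induct with
  | case1 => simp [pvRangeRec]
  | case2 c =>
    by_cases he : c = 'e'
    · simp [pvRangeRec, pvFactor, he, PySem.Dict.getD, PySem.Dict.get?, PySem.Dict.insert,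
            PySem.Dict.empty]
    · by_cases hd : c = 'd'
      · simp [pvRangeRec, pvFactor, hd, PySem.Dict.getD, PySem.Dict.get?, PySem.Dict.insert,
              PySem.Dict.empty]
      · have he' : ('e' == c) = false := beq_eq_false_iff_ne.mpr (fun h => he h.symm)
        have hd' : ('d' == c) = false := beq_eq_false_iff_ne.mpr (fun h => hd h.symm)
        simp [pvRangeRec, pvFactor, he', hd', he, hd, PySem.Dict.getD, PySem.Dict.get?,
              PySem.Dict.insert, PySem.Dict.empty, List.find?]
  | case3 x y rest ih1 ih2 =>
    rw [pvRangeRec, ih1, ih2]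
    have hce : (x :: y :: rest).count 'e' =
        ((x :: y :: rest).take ((x :: y :: rest).length / 2)).count 'e' +
        ((x :: y :: rest).drop ((x :: y :: rest).length / 2)).count 'e' := by
      rw [← List.count_append, List.take_append_drop]
    have hcd : (x :: y :: rest).count 'd' =
        ((x :: y :: rest).take ((x :: y :: rest).length / 2)).count 'd' +
        ((x :: y :: rest).drop ((x :: y :: rest).length / 2)).count 'd' := by
      rw [← List.count_append, List.take_append_drop]
    rw [hce, hcd, pow_add, pow_add]
    ring

theorem get_noid_range_py_spec : Claim_equal_get_noid_range_py := by
  intro mask _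
  show get_noid_range_py mask = get_noid_range_py_alt mask
  simp only [get_noid_range_py, get_noid_range_py_alt, pv_prod_fold, pv_rangeRec_closed]
  ring
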